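-- pv_equiv track=rewrite | github.com/nishadg246/competition | w7/p3.py | calc
-- ===== SOURCE A (Python) =====
-- def is_palindrome(string):
--     for i,char in enumerate(string):
--         if char != string[-i-1]:
--             return False
--     return True
--
-- def bin2(x):
-- 	return bin(x)[2:]
--
-- def isPrime(Number):
--     return 2 in [Number,2**Number%Number]
--
-- def calc(i):
-- 	j=i+1
-- 	while True:
-- 		q=bin2(j)
-- 		if is_palindrome(q) and isPrime(j):
-- 			break
-- 		else:
-- 			j+=1
-- 	return j
-- ===== SOURCE B (Python) =====
-- def _rev_bits(n):
--     m, r = n, 0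
--     while m > 0:
--         r = 2 * r + (m % 2)
--         m //= 2
--     return r
--
-- def calc(i):
--     j = i + 1
--     while True:
--         if _rev_bits(j) == j and (j == 2 or pow(2, j, j) == 2):
--             return j
--         j += 1
-- ===== Notes on version B (the rewrite author's own statement) =====
-- stated objective: faster
-- what changed: B tests each candidate arithmetically instead of symbolically: the string-building bin()/indexed palindrome scan becomes an integer bit-reversal equality test, and the full bignum power 2**j % j becomes built-in modular exponentiation pow(2, j, j).
import Mathlib
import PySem

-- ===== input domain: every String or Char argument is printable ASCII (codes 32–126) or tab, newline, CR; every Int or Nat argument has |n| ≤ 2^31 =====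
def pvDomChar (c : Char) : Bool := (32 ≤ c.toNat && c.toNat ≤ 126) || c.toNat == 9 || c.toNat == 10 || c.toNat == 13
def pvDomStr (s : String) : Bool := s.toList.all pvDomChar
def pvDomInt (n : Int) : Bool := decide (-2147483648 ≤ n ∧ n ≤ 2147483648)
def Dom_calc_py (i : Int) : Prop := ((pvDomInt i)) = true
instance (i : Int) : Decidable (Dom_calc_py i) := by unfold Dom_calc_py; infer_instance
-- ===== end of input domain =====

-- B replaces A's string-built palindrome check and full 2**j power by an integer bit-reversal
-- test and modular exponentiation: faster per candidate, same search order.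
-- A mutates nothing; equivalence is about the return value on Pre_ (i ≥ 0; A raises for i < 0).

-- ===== PORT A =====

-- digits of bin(n) after the '0b' prefix, for n ≥ 1 (bin builds the string MSB first)
def pyBinDigits (n : Nat) : List Char :=
  if h : n = 0 then []
  else pyBinDigits (n / 2) ++ [if n % 2 = 1 then '1' else '0']
  termination_by n
  decreasing_by exact Nat.div_lt_self (Nat.pos_of_ne_zero h) one_lt_two

-- bin(x)[2:]; exact for x ≥ 0 (bin(0)[2:] = "0"); x < 0 is never reached under Pre_
def bin2 (x : Int) : List Char := if x ≤ 0 then ['0'] else pyBinDigits x.toNat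

-- for i,char in enumerate(string): if char != string[-i-1]: return False / return True
def is_palindrome (s : List Char) : Bool :=
  (PySem.List.enumerate s).all (fun ic => PySem.List.pyGet? s (-ic.1 - 1) == some ic.2)

-- 2 in [Number, 2**Number % Number]; 2**Number ported for Number ≥ 0 (loop only reaches
-- Number ≥ 1 under Pre_, where PySem.Int.mod is Python-exact)
def isPrimeA (n : Int) : Bool :=
  ((2 : Int) == n) || ((2 : Int) == PySem.Int.mod ((2 : Int) ^ n.toNat) n)

-- 'while True' with a fuel guard making the recursion structural (both ports share the guard)
def calcLoopA : Nat → Int → Int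
  | 0, j => j
  | f + 1, j => if is_palindrome (bin2 j) && isPrimeA j then j else calcLoopA f (j + 1)

def calc_py (i : Int) : Int := calcLoopA (2 ^ 64) (i + 1)

-- ===== PORT B =====

-- _rev_bits: while m > 0: r = 2*r + m % 2; m //= 2  (loop body runs only for m > 0, so
-- working on n.toNat is exact: for n ≤ 0 Python returns the initial r = 0, as does this)
def revBitsNat (m r : Nat) : Nat :=
  if m = 0 then r else revBitsNat (m / 2) (2 * r + m % 2)
  termination_by m
  decreasing_by exact Nat.div_lt_self (Nat.pos_of_ne_zero (by omega)) one_lt_two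

def revBits (n : Int) : Int := Int.ofNat (revBitsNat n.toNat 0)

def calcLoopB : Nat → Int → Int
  | 0, j => j
  | f + 1, j =>
      if revBits j == j && ((j == 2) || (PySem.Int.powMod 2 j.toNat j == 2)) then j
      else calcLoopB f (j + 1)

def calc_py_alt (i : Int) : Int := calcLoopB (2 ^ 64) (i + 1)

-- ===== PRECONDITION & SPEC =====
-- A raises ZeroDivisionError for i < 0 (the scan reaches j = 0 and computes 2**0 % 0); B raises there too.
def Pre_calc_py (i : Int) : Prop := 0 ≤ i
instance (i : Int) : Decidable (Pre_calc_py i) := by unfold Pre_calc_py; infer_instance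
def pvWitness_calc_py : Int := 0

def Spec_calc_py (i : Int) (out : Int) : Prop := out = calc_py_alt i
instance (i : Int) (out : Int) : Decidable (Spec_calc_py i out) := by unfold Spec_calc_py; infer_instance

-- ===== CLAIM (what is proved, stated in full; the proofs are below) =====
def Claim_equal_calc_py : Prop := ∀ (i : Int), Dom_calc_py i → Pre_calc_py i → Spec_calc_py i (calc_py i)

-- ===== LEMMAS AND PROOFS =====

-- value of a bit string read MSB-first
def bstep (a : Nat) (c : Char) : Nat := 2 * a + (if c = '1' then 1 else 0)
def bval (s : List Char) : Nat := s.foldl bstep 0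

theorem pvGetElemCongr {l : List Char} {i j : Nat} (h : i = j) (hj : j < l.length) :
    l[i]'(h ▸ hj) = l[j]'hj := by subst h; rfl

theorem foldl_bstep_eq (s : List Char) (a : Nat) :
    s.foldl bstep a = a * 2 ^ s.length + bval s := by
  induction s generalizing a with
  | nil => simp [bval]
  | cons c t ih =>
    simp only [List.foldl_cons, List.length_cons, bval] at *
    rw [ih (bstep a c), ih (bstep 0 c)]
    simp only [bstep]
    split <;> ring

theorem bstep_zero_le (c : Char) : bstep 0 c ≤ 1 := by
  unfold bstep; split <;> omega

theorem bval_cons (c : Char) (t : List Char) :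
    bval (c :: t) = bstep 0 c * 2 ^ t.length + bval t := by
  simp only [bval, List.foldl_cons]; exact foldl_bstep_eq t (bstep 0 c)

theorem bval_lt (s : List Char) : bval s < 2 ^ s.length := by
  induction s with
  | nil => simp [bval]
  | cons c t ih =>
    rw [bval_cons, List.length_cons, pow_succ]
    have hb := bstep_zero_le c
    have hm : bstep 0 c * 2 ^ t.length ≤ 2 ^ t.length := by
      calc bstep 0 c * 2 ^ t.length ≤ 1 * 2 ^ t.length := Nat.mul_le_mul_right _ hb
        _ = 2 ^ t.length := one_mul _
    omega

theorem bval_inj (s : List Char) :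
    ∀ (t : List Char), (∀ c ∈ s, c = '0' ∨ c = '1') → (∀ c ∈ t, c = '0' ∨ c = '1') →
    s.length = t.length → bval s = bval t → s = t := by
  induction s with
  | nil =>
    intro t _ _ hlen _
    cases t with
    | nil => rfl
    | cons b t' => simp at hlen
  | cons a s' ih =>
    intro t hs ht hlen hval
    cases t with
    | nil => simp at hlen
    | cons b t' =>
      simp only [List.length_cons] at hlen
      have hl : s'.length = t'.length := by omega
      rw [bval_cons, bval_cons, hl] at hval
      have hs'lt := bval_lt s'
      have ht'lt := bval_lt t'
      rw [hl] at hs'lt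
      have e0 : bstep 0 '0' = 0 := by decide
      have e1 : bstep 0 '1' = 1 := by decide
      have hrec : ∀ c : Char, bval s' = bval t' → a = c → b = c → a :: s' = b :: t' := by
        intro c hv hac hbc
        rw [hac, hbc,
          ih t' (fun x hx => hs x (by simp [hx])) (fun x hx => ht x (by simp [hx])) hl hv]
      rcases hs a (by simp) with ha | ha <;> rcases ht b (by simp) with hb | hb
      · rw [ha, hb, e0] at hval
        exact hrec '0' (by omega) ha hb
      · rw [ha, hb, e0, e1] at hval; omega
      · rw [ha, hb, e0, e1] at hval; omega
      · rw [ha, hb, e1] at hval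
        exact hrec '1' (by omega) ha hb

theorem bval_pyBinDigits (n : Nat) : bval (pyBinDigits n) = n := by
  induction n using Nat.strong_induction_on with
  | _ n ih =>
    rw [pyBinDigits]
    split
    · simp [bval]; omega
    · rename_i h
      simp only [bval, List.foldl_append, List.foldl_cons, List.foldl_nil]
      have := ih (n / 2) (Nat.div_lt_self (Nat.pos_of_ne_zero h) one_lt_two)
      simp only [bval] at this
      rw [this]
      simp only [bstep]
      split <;> rename_i h2 <;> simp <;> omega

theorem bits_pyBinDigits (n : Nat) : ∀ c ∈ pyBinDigits n, c = '0' ∨ c = '1' := by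
  induction n using Nat.strong_induction_on with
  | _ n ih =>
    rw [pyBinDigits]
    split
    · simp
    · rename_i h
      intro c hc
      rw [List.mem_append] at hc
      rcases hc with hc | hc
      · exact ih (n / 2) (Nat.div_lt_self (Nat.pos_of_ne_zero h) one_lt_two) c hc
      · simp at hc; subst hc; split <;> simp

theorem revBitsNat_eq (m : Nat) : ∀ r, revBitsNat m r = (pyBinDigits m).reverse.foldl bstep r := by
  induction m using Nat.strong_induction_on with
  | _ m ih =>
    intro r
    rw [revBitsNat, pyBinDigits]
    split
    · simp
    · rename_i h
      rw [ih (m / 2) (Nat.div_lt_self (Nat.pos_of_ne_zero h) one_lt_two)]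
      simp only [List.reverse_append, List.reverse_cons, List.reverse_nil, List.nil_append,
        List.cons_append, List.foldl_cons]
      congr 1
      simp only [bstep]
      split <;> rename_i h2 <;> simp <;> omega

-- A's index-pair loop is exactly "the list equals its reverse"
theorem is_palindrome_iff (s : List Char) : is_palindrome s = true ↔ s.reverse = s := by
  unfold is_palindrome
  rw [List.all_eq_true]
  have harg : ∀ k : Nat, (-((0 : Int) + (k : Int)) - 1) = -(((k + 1 : Nat) : Int)) := by
    intro k; push_cast; ring
  constructor
  · intro h
    apply List.ext_getElem (by simp)
    intro k hk1 hk2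
    have hmem : ((0 : Int) + (k : Int), s[k]) ∈ PySem.List.enumerate s 0 := by
      rw [PySem.List.mem_enumerate_iff]; exact ⟨k, hk2, rfl⟩
    have hh := h _ hmem
    simp only [beq_iff_eq] at hh
    rw [harg k, PySem.List.pyGet?_neg_natCast s (k + 1) (by omega) (by omega)] at hh
    have hlt : s.length - (k + 1) < s.length := by omega
    rw [List.getElem?_eq_getElem hlt, Option.some_inj] at hh
    rw [List.getElem_reverse]
    exact (pvGetElemCongr (show s.length - 1 - k = s.length - (k + 1) by omega) hlt).trans hh
  · intro h p hp
    rw [PySem.List.mem_enumerate_iff] at hp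
    obtain ⟨k, hk, rfl⟩ := hp
    simp only [beq_iff_eq]
    rw [harg k, PySem.List.pyGet?_neg_natCast s (k + 1) (by omega) (by omega)]
    have hlt : s.length - (k + 1) < s.length := by omega
    rw [List.getElem?_eq_getElem hlt, Option.some_inj]
    have hkrev : k < s.reverse.length := by simp [hk]
    have hrev : s.reverse[k]'hkrev = s[s.length - 1 - k]'(by omega) := List.getElem_reverse hkrev
    have hrs : s.reverse[k]'hkrev = s[k]'hk := by
      have := congrArg (fun l => l[k]?) h
      simp only [List.getElem?_eq_getElem hkrev, List.getElem?_eq_getElem hk,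
        Option.some_inj] at this
      exact this
    rw [← hrs, hrev]
    exact pvGetElemCongr (show s.length - (k + 1) = s.length - 1 - k by omega) (by omega)

theorem pal_test_eq (j : Int) (hj : 1 ≤ j) :
    is_palindrome (bin2 j) = (revBits j == j) := by
  have hnpos : ¬ j ≤ 0 := by omega
  have hjn : j = ((j.toNat : Nat) : Int) := by omega
  set n := j.toNat with hn
  have hn1 : 1 ≤ n := by omega
  have hrev : revBits j = Int.ofNat (revBitsNat n 0) := rfl
  have hb : bin2 j = pyBinDigits n := by unfold bin2; rw [if_neg hnpos]
  rw [hb, hrev]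
  have key : revBitsNat n 0 = n ↔ (pyBinDigits n).reverse = pyBinDigits n := by
    have hr : revBitsNat n 0 = bval ((pyBinDigits n).reverse) := revBitsNat_eq n 0
    constructor
    · intro h
      apply bval_inj
      · intro c hc; exact bits_pyBinDigits n c (List.mem_reverse.mp hc)
      · exact bits_pyBinDigits n
      · simp
      · rw [← hr, h, bval_pyBinDigits]
    · intro h
      rw [hr, h, bval_pyBinDigits]
  rw [Bool.eq_iff_iff, is_palindrome_iff, beq_iff_eq]
  constructor
  · intro h
    rw [hjn]
    exact congrArg Int.ofNat (key.mpr h)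
  · intro h
    apply key.mp
    have h2 : ((revBitsNat n 0 : Nat) : Int) = ((n : Nat) : Int) := by rw [← hjn]; exact h
    exact_mod_cast h2

theorem prime_test_eq (j : Int) :
    isPrimeA j = ((j == 2) || (PySem.Int.powMod 2 j.toNat j == 2)) := by
  unfold isPrimeA PySem.Int.powMod
  rw [Bool.eq_iff_iff]
  simp only [Bool.or_eq_true, beq_iff_eq]
  constructor
  · rintro (h | h) <;> [left; right] <;> omega
  · rintro (h | h) <;> [left; right] <;> omega

theorem loop_eq (f : Nat) : ∀ j : Int, 1 ≤ j → calcLoopA f j = calcLoopB f j := by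
  induction f with
  | zero => intro j _; rfl
  | succ f ih =>
    intro j hj
    unfold calcLoopA calcLoopB
    rw [pal_test_eq j hj, prime_test_eq j]
    split
    · rfl
    · exact ih (j + 1) (by omega)

-- ===== VERDICT (by name: the statement is the Claim_ definition above) =====
theorem calc_py_spec : Claim_equal_calc_py := by
  intro i _ hpre
  unfold Spec_calc_py calc_py calc_py_alt
  exact loop_eq (2 ^ 64) (i + 1) (by unfold Pre_calc_py at hpre; omega)
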